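-- pv_equiv track=rewrite | github.com/fkfouri/music_gen | curso_001/lesson11.py | generate_drum_pattern
-- ===== SOURCE A (Python) =====
-- drums = {
--     "bass_drum": 36,  # Bass Drum
--     "snare": 38,  # Snare Drum
--     "closed_hat": 42,  # Closed Hi-Hat
--     "open_hat": 46,  # Open Hi-Hat
--     "crash": 49,  # Crash Cymbal
-- }
--
-- def generate_drum_pattern(length):  # _in_bars=4, beats_per_bar=4):
--     drum_pattern = []
--     for i in range(length):
--         # Basic rock beat pattern
--         if i % 4 == 0:
--             drum_pattern.append((drums["bass_drum"], 64))  # Bass drum on beat 1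
--         elif i % 4 == 2:
--             drum_pattern.append((drums["snare"], 40))  # Snare on beat 3
--         elif i % 2 == 1:
--             drum_pattern.append((drums["closed_hat"], 64))  # Hi-hat on every beat
--         elif i % 4 == 3:
--             drum_pattern.append((drums["crash"], 50))  # Open hi-hat on the "and" of beat 4
--         else:
--             drum_pattern.append((None, 0))  # No drum hit
--     return drum_pattern
-- ===== SOURCE B (Python) =====
-- # Builds the music bar-by-bar: tile the 4-beat rock bar enough times, then trim.
-- def generate_drum_pattern(length):
--     bar = [(36, 64), (42, 64), (38, 40), (42, 64)]
--     return (bar * ((length + 3) // 4))[:length]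
-- ===== Notes on version B (the rewrite author's own statement) =====
-- stated objective: simpler
-- what changed: Replaces A's per-index if/elif cascade over range(length) with tiling: one four-beat bar literal is repeated by list multiplication (ceiling division for the bar count) and the result is sliced down to length; list multiplication also makes it measurably faster.
import Mathlib
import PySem

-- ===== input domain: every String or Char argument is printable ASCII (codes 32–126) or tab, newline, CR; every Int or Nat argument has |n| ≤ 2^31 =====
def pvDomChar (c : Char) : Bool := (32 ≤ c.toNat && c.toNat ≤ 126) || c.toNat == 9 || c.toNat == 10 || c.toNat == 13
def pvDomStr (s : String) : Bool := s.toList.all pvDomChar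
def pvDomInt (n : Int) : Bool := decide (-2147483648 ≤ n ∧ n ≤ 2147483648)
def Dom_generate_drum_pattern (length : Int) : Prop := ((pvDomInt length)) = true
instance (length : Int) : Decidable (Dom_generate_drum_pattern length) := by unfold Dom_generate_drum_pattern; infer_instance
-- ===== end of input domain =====

-- B builds the pattern bar-by-bar (tile one 4-beat bar ceil(length/4) times, then trim) instead of A's per-index if/elif cascade; objective: simpler.

-- ===== PORT A =====
-- module-level dict 'drums'
def pvDrums : PySem.Dict String Int :=
  PySem.Dict.ofList [("bass_drum", 36), ("snare", 38), ("closed_hat", 42), ("open_hat", 46), ("crash", 49)]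

-- drums["k"] ported as (get? …).getD 0: exact here since every looked-up key is present
def generate_drum_pattern (length : Int) : List (Option Int × Int) :=
  (PySem.List.pyRange 0 length 1).foldl (fun drum_pattern i =>
    if PySem.Int.mod i 4 = 0 then
      drum_pattern ++ [(some ((pvDrums.get? "bass_drum").getD 0), 64)]
    else if PySem.Int.mod i 4 = 2 then
      drum_pattern ++ [(some ((pvDrums.get? "snare").getD 0), 40)]
    else if PySem.Int.mod i 2 = 1 then
      drum_pattern ++ [(some ((pvDrums.get? "closed_hat").getD 0), 64)]
    else if PySem.Int.mod i 4 = 3 then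
      drum_pattern ++ [(some ((pvDrums.get? "crash").getD 0), 50)]
    else
      drum_pattern ++ [((none : Option Int), 0)]) []

-- ===== PORT B =====
def pvBar : List (Option Int × Int) := [(some 36, 64), (some 42, 64), (some 38, 40), (some 42, 64)]

-- Python's 'xs * n' (empty for n ≤ 0), exact
def pvListMul {α : Type} (xs : List α) (n : Int) : List α := (List.replicate n.toNat xs).flatten

def generate_drum_pattern_alt (length : Int) : List (Option Int × Int) :=
  PySem.List.slice (pvListMul pvBar (PySem.Int.floordiv (length + 3) 4)) none (some length)

-- ===== PRECONDITION & SPEC =====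
def Spec_generate_drum_pattern (length : Int) (out : List (Option Int × Int)) : Prop := out = generate_drum_pattern_alt length
instance (length : Int) (out : List (Option Int × Int)) : Decidable (Spec_generate_drum_pattern length out) := by unfold Spec_generate_drum_pattern; infer_instance

-- ===== CLAIM (what is proved, stated in full; the proofs are below) =====
def Claim_equal_generate_drum_pattern : Prop := ∀ (length : Int), Dom_generate_drum_pattern length → Spec_generate_drum_pattern length (generate_drum_pattern length)

-- ===== LEMMAS AND PROOFS =====

-- what A appends for index i, as a function
def pvStepA (i : Int) : Option Int × Int :=
  if PySem.Int.mod i 4 = 0 then (some 36, 64)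
  else if PySem.Int.mod i 4 = 2 then (some 38, 40)
  else if PySem.Int.mod i 2 = 1 then (some 42, 64)
  else if PySem.Int.mod i 4 = 3 then (some 49, 50)
  else (none, 0)

-- beat j of the tiled song, on the Nat side
def pvBeat (j : Nat) : Option Int × Int := pvBar.getD (j % 4) (none, 0)

theorem pvStepA_natCast (j : Nat) : pvStepA (j : Int) = pvBeat j := by
  have h4 : PySem.Int.mod (j : Int) 4 = ((j % 4 : Nat) : Int) := PySem.Int.mod_natCast j 4
  have h2 : PySem.Int.mod (j : Int) 2 = ((j % 2 : Nat) : Int) := PySem.Int.mod_natCast j 2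
  have h22 : j % 2 = (j % 4) % 2 := (Nat.mod_mod_of_dvd j (by norm_num)).symm
  have hhi : j % 4 < 4 := Nat.mod_lt _ (by norm_num)
  unfold pvStepA pvBeat
  rw [h4, h2, h22]
  interval_cases h : j % 4 <;> simp [pvBar]

theorem pvTile (k : Nat) :
    (List.replicate k pvBar).flatten = (List.range (4 * k)).map pvBeat := by
  induction k with
  | zero => simp
  | succ k ih =>
    rw [List.replicate_succ', List.flatten_append, ih]
    have : 4 * (k + 1) = ((((4 * k) + 1) + 1) + 1) + 1 := by ring
    rw [this, List.range_succ, List.range_succ, List.range_succ, List.range_succ]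
    simp only [List.map_append, List.append_assoc, List.flatten_cons, List.flatten_nil,
      List.append_nil, List.map_cons, List.map_nil]
    congr 1
    have h0 : (4 * k) % 4 = 0 := by omega
    have h1 : (4 * k + 1) % 4 = 1 := by omega
    have h2 : (4 * k + 2) % 4 = 2 := by omega
    have h3 : (4 * k + 3) % 4 = 3 := by omega
    simp [pvBeat, h0, h1, h2, h3, pvBar]

-- A's fold, rewritten as a map
theorem pvA_eq_map (length : Int) :
    generate_drum_pattern length = (PySem.List.pyRange 0 length 1).map pvStepA := by
  unfold generate_drum_pattern
  rw [show (fun (drum_pattern : List (Option Int × Int)) (i : Int) =>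
      if PySem.Int.mod i 4 = 0 then
        drum_pattern ++ [(some ((pvDrums.get? "bass_drum").getD 0), 64)]
      else if PySem.Int.mod i 4 = 2 then
        drum_pattern ++ [(some ((pvDrums.get? "snare").getD 0), 40)]
      else if PySem.Int.mod i 2 = 1 then
        drum_pattern ++ [(some ((pvDrums.get? "closed_hat").getD 0), 64)]
      else if PySem.Int.mod i 4 = 3 then
        drum_pattern ++ [(some ((pvDrums.get? "crash").getD 0), 50)]
      else
        drum_pattern ++ [((none : Option Int), 0)])
      = fun drum_pattern i => drum_pattern ++ [pvStepA i] from by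
    funext acc i
    unfold pvStepA
    split_ifs <;> simp <;> decide]
  simpa using PySem.List.foldl_append_singleton_eq_map pvStepA (PySem.List.pyRange 0 length 1) []

-- ===== VERDICT (by name: the statement is the Claim_ definition above) =====
theorem generate_drum_pattern_spec : Claim_equal_generate_drum_pattern := by
  intro length _
  unfold Spec_generate_drum_pattern generate_drum_pattern_alt pvListMul
  rw [pvA_eq_map]
  by_cases hle : length ≤ 0
  · have hr : PySem.List.pyRange 0 length 1 = [] := by
      simp [PySem.List.pyRange]; omega
    have hk : (PySem.Int.floordiv (length + 3) 4).toNat = 0 := by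
      have := (PySem.Int.floordiv_eq_ediv_of_pos (a := length + 3) (b := 4) (by norm_num))
      rw [this]
      omega
    rw [hr, hk]
    simp [PySem.List.slice]
  · have hpos : 0 < length := by omega
    obtain ⟨n, hn⟩ : ∃ n : Nat, length = (n : Int) := ⟨length.toNat, by omega⟩
    subst hn
    have hk : PySem.Int.floordiv ((n : Int) + 3) 4 = (((n + 3) / 4 : Nat) : Int) := by
      exact_mod_cast PySem.Int.floordiv_natCast (n + 3) 4
    rw [hk]
    set k := (n + 3) / 4 with hkdef
    have hkn : n ≤ 4 * k := by omega
    rw [Int.toNat_natCast, pvTile k, PySem.List.slice_to_natCast]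
    rw [PySem.List.pyRange_zero_natCast]
    rw [← List.map_take, List.take_range, Nat.min_eq_left hkn, List.map_map]
    exact List.map_congr_left (fun j _ => pvStepA_natCast j)
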